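-- pv_equiv track=rewrite | github.com/pavankumarsai18/LeetCode | 0694-number-of-distinct-islands/solution.py | getShapeOfIsland
-- ===== SOURCE A (Python) =====
-- def getShapeOfIsland(island):
--     shape = []
--     island = sorted(list(island))
--     length = len(island)
--
--     curIndex, skipAmt  = 0, 0
--     prevCol   = island[curIndex][1]
--
--     while curIndex < length:
--         curRow, curCol = island[curIndex]
--         index  = curIndex
--         rowLen   = 0
--
--         while index < length and island[index][0] == curRow:
--             index += 1
--             rowLen  += 1
--
--         shape.append((rowLen ,curCol - prevCol))
--         prevCol = curCol
--         curIndex = index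
--     return shape
-- ===== SOURCE B (Python) =====
-- def getShapeOfIsland(island):
--     byRow = {}
--     for r, c in island:
--         byRow[r] = byRow.get(r, []) + [c]
--     rows = sorted(byRow)
--     prevMin = min(byRow[rows[0]])
--     shape = []
--     for r in rows:
--         cols = byRow[r]
--         curMin = min(cols)
--         shape.append((len(cols), curMin - prevMin))
--         prevMin = curMin
--     return shape
-- ===== Notes on version B (the rewrite author's own statement) =====
-- stated objective: simpler
-- what changed: B replaces A's index-walk with manual run-detection over the fully sorted cell list by a one-pass row->columns dict bucket, then a single loop over the sorted row keys using len() and min() per bucket.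
import Mathlib
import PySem

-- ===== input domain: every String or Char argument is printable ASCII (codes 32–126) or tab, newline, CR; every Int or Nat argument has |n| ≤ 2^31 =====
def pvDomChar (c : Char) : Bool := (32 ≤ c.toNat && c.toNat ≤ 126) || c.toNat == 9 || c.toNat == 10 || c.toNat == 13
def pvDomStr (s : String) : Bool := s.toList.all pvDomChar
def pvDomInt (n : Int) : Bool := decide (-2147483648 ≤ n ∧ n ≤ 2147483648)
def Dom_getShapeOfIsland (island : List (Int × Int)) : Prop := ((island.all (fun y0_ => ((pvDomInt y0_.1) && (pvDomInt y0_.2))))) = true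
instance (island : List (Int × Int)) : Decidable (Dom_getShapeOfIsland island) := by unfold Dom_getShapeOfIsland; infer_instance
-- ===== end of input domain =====

-- B replaces A's run-detection walk over the sorted cell list by a row→columns dict built in one
-- pass plus one loop over the sorted keys (len/min per bucket); objective: simpler. A and B both
-- raise IndexError on the empty list, so Pre_ excludes it.

-- ===== PORT A =====
-- inner while: number of leading elements of the suffix whose row equals curRow
def aRun (r : Int) : List (Int × Int) → Nat
  | [] => 0
  | (r', _) :: t => if r' == r then aRun r t + 1 else 0

-- outer while over the suffix starting at curIndex
def aLoop (prevCol : Int) : List (Int × Int) → List (Int × Int)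
  | [] => []
  | (r, c) :: t =>
    ((1 + aRun r t : Nat), c - prevCol) :: aLoop c (t.drop (aRun r t))
termination_by l => l.length
decreasing_by
  simp only [List.length_cons, List.length_drop]
  omega

def getShapeOfIsland (island : List (Int × Int)) : List (Int × Int) :=
  match PySem.List.sorted2 island Prod.fst Prod.snd with
  | [] => []                        -- Python raises IndexError here (island[0]); excluded by Pre_
  | (r, c) :: t => aLoop c ((r, c) :: t)   -- prevCol = island[0][1] = c

-- ===== PORT B =====
-- byRow[r] = byRow.get(r, []) + [c] over the cells
def bBuild (island : List (Int × Int)) : PySem.Dict Int (List Int) :=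
  island.foldl (fun d p => d.modify p.1 [] (fun x => x ++ [p.2])) PySem.Dict.empty

-- the for-loop over the sorted keys
def bLoop (byRow : PySem.Dict Int (List Int)) : Int → List Int → List (Int × Int)
  | _, [] => []
  | prevMin, r :: rest =>
    let cols := byRow.getD r []
    let curMin := (PySem.List.min? cols (fun x => x)).getD 0
    ((cols.length : Int), curMin - prevMin) :: bLoop byRow curMin rest

def getShapeOfIsland_alt (island : List (Int × Int)) : List (Int × Int) :=
  let byRow := bBuild island
  let rows := PySem.List.sorted byRow.keys (fun x => x)
  match rows with
  | [] => []                        -- Python raises IndexError here (rows[0]); excluded by Pre_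
  | r0 :: _ =>
    bLoop byRow ((PySem.List.min? (byRow.getD r0 []) (fun x => x)).getD 0) rows

-- ===== PRECONDITION & SPEC =====
-- Pre_ excludes only the empty list, on which both A and B raise IndexError (island[0] / rows[0]).
def Pre_getShapeOfIsland (island : List (Int × Int)) : Prop := island ≠ []
instance (island : List (Int × Int)) : Decidable (Pre_getShapeOfIsland island) := by unfold Pre_getShapeOfIsland; infer_instance
def pvWitness_getShapeOfIsland : (List (Int × Int)) := [(1, 5), (1, 2), (2, 7), (0, 9)]

def Spec_getShapeOfIsland (island : List (Int × Int)) (out : List (Int × Int)) : Prop := out = getShapeOfIsland_alt island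
instance (island : List (Int × Int)) (out : List (Int × Int)) : Decidable (Spec_getShapeOfIsland island out) := by unfold Spec_getShapeOfIsland; infer_instance

-- ===== CLAIM (what is proved, stated in full; the proofs are below) =====
def Claim_equal_getShapeOfIsland : Prop := ∀ (island : List (Int × Int)), Dom_getShapeOfIsland island → Pre_getShapeOfIsland island → Spec_getShapeOfIsland island (getShapeOfIsland island)

-- ===== LEMMAS AND PROOFS =====

-- lexicographic ≤ on cells, the order Python's tuple sort realises
def lexLe (a b : Int × Int) : Prop := a.1 < b.1 ∨ (a.1 = b.1 ∧ a.2 ≤ b.2)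

-- a single Int key realising the lexicographic order on Dom-bounded pairs
def pvKey (p : Int × Int) : Int := p.1 * 17179869184 + p.2

def pvBnd (p : Int × Int) : Prop :=
  -2147483648 ≤ p.1 ∧ p.1 ≤ 2147483648 ∧ -2147483648 ≤ p.2 ∧ p.2 ≤ 2147483648

lemma dom_bnd (island : List (Int × Int)) (h : Dom_getShapeOfIsland island) :
    ∀ p ∈ island, pvBnd p := by
  intro p hp
  unfold Dom_getShapeOfIsland at h
  have := List.all_eq_true.mp h p hp
  simp only [pvDomInt, Bool.and_eq_true, decide_eq_true_eq] at this
  exact ⟨this.1.1, this.1.2, this.2.1, this.2.2⟩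

lemma insertBy_congr {α : Type} (b1 b2 : α → α → Bool) (x : α) :
    ∀ l : List α, (∀ y ∈ l, b1 x y = b2 x y) →
      PySem.List.insertBy b1 x l = PySem.List.insertBy b2 x l := by
  intro l
  induction l with
  | nil => intro _; rfl
  | cons y ys ih =>
    intro h
    simp only [PySem.List.insertBy]
    rw [h y (List.mem_cons_self), ih (fun z hz => h z (List.mem_cons_of_mem _ hz))]

lemma foldl_insertBy_congr {α : Type} (P : α → Prop) (b1 b2 : α → α → Bool)
    (hb : ∀ a b, P a → P b → b1 a b = b2 a b) :
    ∀ (xs acc : List α), (∀ y ∈ xs, P y) → (∀ y ∈ acc, P y) →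
      xs.foldl (fun acc x => PySem.List.insertBy b1 x acc) acc
        = xs.foldl (fun acc x => PySem.List.insertBy b2 x acc) acc := by
  intro xs
  induction xs with
  | nil => intro _ _ _; rfl
  | cons x xs ih =>
    intro acc hxs hacc
    simp only [List.foldl_cons]
    rw [insertBy_congr b1 b2 x acc
        (fun y hy => hb x y (hxs x (List.mem_cons_self)) (hacc y hy))]
    exact ih _ (fun y hy => hxs y (List.mem_cons_of_mem _ hy))
      (fun y hy => (PySem.List.mem_insertBy _ _ _ _ |>.mp hy).elim
        (fun e => e ▸ hxs x (List.mem_cons_self)) (fun hm => hacc y hm))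

-- Python's tuple sort of the cells equals the single-key sort under the Dom bounds
lemma sorted2_eq (xs : List (Int × Int)) (h : ∀ p ∈ xs, pvBnd p) :
    PySem.List.sorted2 xs Prod.fst Prod.snd = PySem.List.sorted xs pvKey := by
  unfold PySem.List.sorted2 PySem.List.sorted
  exact foldl_insertBy_congr pvBnd _ _
    (by
      intro a b ha hb
      obtain ⟨ha1, ha2, ha3, ha4⟩ := ha
      obtain ⟨hb1, hb2, hb3, hb4⟩ := hb
      by_cases h1 : a.1 < b.1 <;> by_cases h2 : b.1 < a.1 <;> by_cases h3 : a.2 < b.2 <;>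
        simp [h1, h2, h3, pvKey] <;> omega)
    xs [] h (by simp)

lemma sorted_lexLe (island : List (Int × Int)) (h : ∀ p ∈ island, pvBnd p) :
    (PySem.List.sorted island pvKey).Pairwise lexLe := by
  have hk := PySem.List.sorted_pairwise island pvKey
  refine hk.imp_of_mem ?_
  intro a b ha hb hab
  have ha' := h a ((PySem.List.sorted_perm island pvKey false).mem_iff.mp ha)
  have hb' := h b ((PySem.List.sorted_perm island pvKey false).mem_iff.mp hb)
  obtain ⟨a1, a2, a3, a4⟩ := ha'
  obtain ⟨b1, b2, b3, b4⟩ := hb'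
  unfold pvKey at hab
  unfold lexLe
  omega

-- the inner while of A on a lexicographically sorted suffix: counts the run, lands past it
lemma run_facts (r : Int) :
    ∀ t : List (Int × Int), t.Pairwise lexLe → (∀ x ∈ t, r ≤ x.1) →
      aRun r t = t.countP (fun x => x.1 == r) ∧
      t.drop (aRun r t) = t.filter (fun x => !(x.1 == r)) := by
  intro t
  induction t with
  | nil => intro _ _; simp [aRun]
  | cons hd t' ih =>
    intro hpw hge
    obtain ⟨r', c'⟩ := hd
    have hhd : ∀ x ∈ t', lexLe (r', c') x := fun x hx => List.rel_of_pairwise_cons hpw hx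
    have hpt : t'.Pairwise lexLe := hpw.of_cons
    by_cases hr : r' = r
    · subst hr
      have hge' : ∀ x ∈ t', r' ≤ x.1 := by
        intro x hx
        rcases hhd x hx with h | h
        · omega
        · omega
      obtain ⟨hcnt, hdrop⟩ := ih hpt hge'
      constructor
      · simp [aRun, hcnt]
      · simp [aRun, hdrop]
    · have hlt : r < r' := lt_of_le_of_ne (hge (r', c') (List.mem_cons_self)) (Ne.symm hr)
      have hne : ∀ x ∈ (r', c') :: t', ¬(x.1 == r) = true := by
        intro x hx
        rcases List.mem_cons.mp hx with rfl | hx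
        · simp; omega
        · rcases hhd x hx with h | h <;> simp <;> omega
      have hr' : (r' == r) = false := by simp [hr]
      have hz : aRun r ((r', c') :: t') = 0 := by simp [aRun, hr']
      constructor
      · rw [hz]
        exact (List.countP_eq_zero.mpr hne).symm
      · rw [hz, List.drop_zero]
        exact (List.filter_eq_self.mpr (fun a ha => by
          simpa using hne a ha)).symm

-- min(cols) where cols is a permutation of a list headed by its minimum
lemma min_head (c : Int) (l : List Int) (hall : ∀ y ∈ c :: l, c ≤ y)
    (cols : List Int) (hperm : cols.Perm (c :: l)) :
    (PySem.List.min? cols (fun x => x)).getD 0 = c := by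
  have hne : cols ≠ [] := by
    intro h
    subst h
    exact absurd hperm.symm.length_eq (by simp)
  obtain ⟨m, hm⟩ : ∃ m, PySem.List.min? cols (fun x => x) = some m := by
    cases h : PySem.List.min? cols (fun x => x) with
    | none => exact absurd ((PySem.List.min?_eq_none_iff cols _).mp h) hne
    | some m => exact ⟨m, rfl⟩
  have hmem : m ∈ cols := PySem.List.min?_mem hm
  have h1 : c ≤ m := hall m (hperm.mem_iff.mp hmem)
  have h2 : m ≤ c := PySem.List.min?_isMin hm c (hperm.mem_iff.mpr (List.mem_cons_self))
  rw [hm]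
  simp
  omega

-- the minimum column of the head row, read off cols = byRow[r]
lemma head_min (r c : Int) (t : List (Int × Int)) (cols : List Int)
    (hpw : ((r, c) :: t).Pairwise lexLe)
    (hperm : cols.Perm ((((r, c) :: t).filter (fun x => x.1 == r)).map (fun x => x.2))) :
    (PySem.List.min? cols (fun x => x)).getD 0 = c := by
  have hfe : (((r, c) :: t).filter (fun x => x.1 == r)).map (fun x => x.2)
      = c :: ((t.filter (fun x => x.1 == r)).map (fun x => x.2)) := by
    simp
  refine min_head c _ ?_ cols (hfe ▸ hperm)
  intro y hy
  rcases List.mem_cons.mp hy with rfl | hy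
  · omega
  · obtain ⟨x, hx, rfl⟩ := List.mem_map.mp hy
    have hx' := List.mem_filter.mp hx
    have := List.rel_of_pairwise_cons hpw hx'.1
    have hx1 : x.1 = r := by simpa using hx'.2
    rcases this with h | h <;> omega

-- the first sorted row key is the row of the first sorted cell
lemma head_row (r0 : Int) (rest : List Int) (r c : Int) (t : List (Int × Int))
    (hpw : ((r, c) :: t).Pairwise lexLe)
    (hrpw : (r0 :: rest).Pairwise (· < ·))
    (hmemr : r ∈ r0 :: rest)
    (hex : ∃ x ∈ (r, c) :: t, x.1 = r0) : r0 = r := by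
  obtain ⟨x, hx, hx1⟩ := hex
  have h1 : r ≤ r0 := by
    rcases List.mem_cons.mp hx with rfl | hx
    · omega
    · rcases List.rel_of_pairwise_cons hpw hx with h | h <;> omega
  rcases List.mem_cons.mp hmemr with rfl | hmemr
  · rfl
  · have := List.rel_of_pairwise_cons hrpw hmemr
    omega

-- main loop correspondence: A's walk over the sorted cells vs B's walk over the sorted row keys
lemma main_loop (byRow : PySem.Dict Int (List Int)) :
    ∀ (rows : List Int) (s : List (Int × Int)) (prev : Int),
      s.Pairwise lexLe → rows.Pairwise (· < ·) →
      (∀ x ∈ s, x.1 ∈ rows) → (∀ r ∈ rows, ∃ x ∈ s, x.1 = r) →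
      (∀ r ∈ rows, (byRow.getD r []).Perm ((s.filter (fun x => x.1 == r)).map (fun x => x.2))) →
      aLoop prev s = bLoop byRow prev rows := by
  intro rows
  induction rows with
  | nil =>
    intro s prev _ _ hx _ _
    cases s with
    | nil => simp [aLoop, bLoop]
    | cons hd tl => exact absurd (hx hd (List.mem_cons_self)) (by simp)
  | cons r rest ih =>
    intro s prev hpw hrpw hx hr hcols
    cases s with
    | nil =>
      exact absurd (hr r (List.mem_cons_self)) (by simp)
    | cons hd t =>
      obtain ⟨r0, c⟩ := hd
      have hr0 : r = r0 :=
        head_row r rest r0 c t hpw hrpw (hx (r0, c) (List.mem_cons_self))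
          (hr r (List.mem_cons_self))
      subst hr0
      have hhd : ∀ x ∈ t, lexLe (r, c) x := fun x hx => List.rel_of_pairwise_cons hpw hx
      have hpt : t.Pairwise lexLe := hpw.of_cons
      have hge : ∀ x ∈ t, r ≤ x.1 := by
        intro x hx'
        rcases hhd x hx' with h | h <;> omega
      obtain ⟨hcnt, hdrop⟩ := run_facts r t hpt hge
      have hcolsr := hcols r (List.mem_cons_self)
      have hlen : (byRow.getD r []).length = 1 + aRun r t := by
        rw [hcolsr.length_eq]
        simp only [List.filter_cons, beq_self_eq_true, if_true, List.map_cons,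
          List.length_cons, List.length_map, hcnt, List.countP_eq_length_filter]
        omega
      have hmin : (PySem.List.min? (byRow.getD r []) (fun x => x)).getD 0 = c :=
        head_min r c t _ hpw hcolsr
      show _ = bLoop byRow prev (r :: rest)
      simp only [bLoop, aLoop, hmin, hlen, List.cons.injEq]
      refine ⟨trivial, ?_⟩
      rw [hdrop]
      refine ih (t.filter (fun x => !(x.1 == r))) c
        (hpt.sublist List.filter_sublist) hrpw.of_cons ?_ ?_ ?_
      · intro x hx'
        have hxf := List.mem_filter.mp hx'
        have hx1 : x.1 ≠ r := by simpa using hxf.2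
        rcases List.mem_cons.mp (hx x (List.mem_cons_of_mem _ hxf.1)) with h | h
        · omega
        · exact h
      · intro r' hr'
        obtain ⟨x, hx', hx1⟩ := hr r' (List.mem_cons_of_mem _ hr')
        have hne : r' ≠ r := by
          have := List.rel_of_pairwise_cons hrpw hr'
          omega
        have hxt : x ∈ t := by
          rcases List.mem_cons.mp hx' with rfl | hx'
          · exact absurd hx1.symm (by simpa using hne)
          · exact hx'
        exact ⟨x, List.mem_filter.mpr ⟨hxt, by simp; omega⟩, hx1⟩
      · intro r' hr'
        have hne : r' ≠ r := by
          have := List.rel_of_pairwise_cons hrpw hr'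
          omega
        have heq : ((r, c) :: t).filter (fun x => x.1 == r')
            = (t.filter (fun x => !(x.1 == r))).filter (fun x => x.1 == r') := by
          rw [List.filter_filter]
          rw [List.filter_cons]
          rw [if_neg (show ¬((r, c).1 == r') = true by simpa using fun h : r = r' => hne h.symm)]
          refine List.filter_congr ?_
          intro x _
          by_cases h : x.1 = r'
          · simp [h]; omega
          · simp [h]
        have := hcols r' (List.mem_cons_of_mem _ hr')
        rw [heq] at this
        exact this

-- ===== VERDICT (by name: the statement is the Claim_ definition above) =====
theorem getShapeOfIsland_spec : Claim_equal_getShapeOfIsland := by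
  intro island hdom hpre
  unfold Spec_getShapeOfIsland getShapeOfIsland getShapeOfIsland_alt
  have hbnd := dom_bnd island hdom
  rw [sorted2_eq island hbnd]
  have hperm := PySem.List.sorted_perm island pvKey false
  have hpw := sorted_lexLe island hbnd
  -- keys of the dict
  have hkeys : (bBuild island).keys = PySem.Set.update [] (island.map (fun p => p.1)) := by
    unfold bBuild
    exact PySem.Dict.keys_foldl_modify_key island (fun p => p.1) [] _ PySem.Dict.empty
  have hknd : (bBuild island).keys.Nodup := by
    unfold bBuild
    exact PySem.Dict.nodup_keys_foldl_modify_key island (fun p => p.1) [] _ PySem.Dict.empty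
      PySem.Dict.nodup_keys_empty
  have hkmem : ∀ x, x ∈ (bBuild island).keys ↔ ∃ p ∈ island, p.1 = x := by
    intro x
    rw [hkeys, PySem.Set.mem_update]
    simp
  have hgetD : ∀ r, (bBuild island).getD r []
      = (island.filter (fun x => x.1 == r)).map (fun x => x.2) := by
    intro r
    unfold bBuild
    rw [PySem.Dict.getD_foldl_modify_append island PySem.Dict.empty r]
    simp
  -- properties of the sorted key list
  set rows := PySem.List.sorted (bBuild island).keys (fun x => x) with hrows
  have hrperm : rows.Perm (bBuild island).keys := PySem.List.sorted_perm _ _ false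
  have hrpw : rows.Pairwise (· < ·) := by
    have h1 : rows.Pairwise (· ≤ ·) := by
      have := PySem.List.sorted_pairwise (bBuild island).keys (fun x => x)
      simpa using this
    have h2 : rows.Nodup := hrperm.nodup_iff.mpr hknd
    exact (h1.and h2).imp (fun ⟨a, b⟩ => lt_of_le_of_ne a b)
  have hrmem : ∀ x, x ∈ rows ↔ ∃ p ∈ island, p.1 = x := by
    intro x
    rw [hrperm.mem_iff]
    exact hkmem x
  have hcols : ∀ r ∈ rows, ((bBuild island).getD r []).Perm
      ((( PySem.List.sorted island pvKey).filter (fun x => x.1 == r)).map (fun x => x.2)) := by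
    intro r _
    rw [hgetD r]
    exact ((hperm.filter (fun x => x.1 == r)).map (fun x => x.2)).symm
  have hx : ∀ x ∈ PySem.List.sorted island pvKey, x.1 ∈ rows := by
    intro x hxs
    exact (hrmem x.1).mpr ⟨x, hperm.mem_iff.mp hxs, rfl⟩
  have hr : ∀ r ∈ rows, ∃ x ∈ PySem.List.sorted island pvKey, x.1 = r := by
    intro r hrs
    obtain ⟨p, hp, hp1⟩ := (hrmem r).mp hrs
    exact ⟨p, hperm.mem_iff.mpr hp, hp1⟩
  cases hs : PySem.List.sorted island pvKey with
  | nil =>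
    exact absurd ((PySem.List.sorted_eq_nil_iff island pvKey false).mp hs) hpre
  | cons hd t =>
    obtain ⟨r0, c⟩ := hd
    rw [hs] at hperm hpw hcols hx hr
    cases hrowsc : rows with
    | nil => exact absurd (hx (r0, c) (List.mem_cons_self)) (by simp [hrowsc])
    | cons rh rrest =>
      rw [hrowsc] at hrpw hcols hx hr
      have hrh : rh = r0 :=
        head_row rh rrest r0 c t hpw hrpw (hx (r0, c) (List.mem_cons_self))
          (hr rh (List.mem_cons_self))
      subst hrh
      have hmin : (PySem.List.min? ((bBuild island).getD rh []) (fun x => x)).getD 0 = c :=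
        head_min rh c t _ hpw (hcols rh (List.mem_cons_self))
      have hsk : PySem.List.sorted (bBuild island).keys (fun x => x) = rh :: rrest :=
        hrows ▸ hrowsc
      simp only [hsk, hmin]
      exact main_loop (bBuild island) (rh :: rrest) ((rh, c) :: t) c hpw hrpw hx hr hcols
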